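-- pv_equiv track=rewrite | github.com/ChrisHenryOC/samantha-public | src/evaluation/analysis.py | compute_rule_selection_matrix
-- ===== SOURCE A (Python) =====
-- from typing import Any
--
-- def compute_rule_selection_matrix(steps: list[dict[str, Any]]) -> dict[str, int]:
--     """Compute the 2×2 rule-selection diagnostic matrix.
--
--     Returns counts for the four quadrants:
--     - ``right_rule_right_state``: both correct
--     - ``right_rule_wrong_state``: rule correct, state wrong
--     - ``wrong_rule_right_state``: state correct, rule wrong
--     - ``wrong_rule_wrong_state``: both wrong
--     """
--     matrix = {
--         "right_rule_right_state": 0,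
--         "right_rule_wrong_state": 0,
--         "wrong_rule_right_state": 0,
--         "wrong_rule_wrong_state": 0,
--     }
--     for step in steps:
--         rules_ok = step["rules_correct"]
--         state_ok = step["state_correct"]
--         if rules_ok and state_ok:
--             matrix["right_rule_right_state"] += 1
--         elif rules_ok and not state_ok:
--             matrix["right_rule_wrong_state"] += 1
--         elif not rules_ok and state_ok:
--             matrix["wrong_rule_right_state"] += 1
--         else:
--             matrix["wrong_rule_wrong_state"] += 1
--     return matrix
-- ===== SOURCE B (Python) =====
-- def compute_rule_selection_matrix(steps):
--     total = rules = state = both = 0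
--     for step in steps:
--         rules_ok = step["rules_correct"]
--         state_ok = step["state_correct"]
--         total += 1
--         if rules_ok:
--             rules += 1
--         if state_ok:
--             state += 1
--         if rules_ok and state_ok:
--             both += 1
--     return {
--         "right_rule_right_state": both,
--         "right_rule_wrong_state": rules - both,
--         "wrong_rule_right_state": state - both,
--         "wrong_rule_wrong_state": total - rules - state + both,
--     }
-- ===== Notes on version B (the rewrite author's own statement) =====
-- stated objective: alternative
-- what changed: Instead of a four-way branch per step, B accumulates aggregate totals (count, rules-correct, state-correct, both) in one pass and derives the four quadrant cells afterwards by inclusion-exclusion.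
import Mathlib
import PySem

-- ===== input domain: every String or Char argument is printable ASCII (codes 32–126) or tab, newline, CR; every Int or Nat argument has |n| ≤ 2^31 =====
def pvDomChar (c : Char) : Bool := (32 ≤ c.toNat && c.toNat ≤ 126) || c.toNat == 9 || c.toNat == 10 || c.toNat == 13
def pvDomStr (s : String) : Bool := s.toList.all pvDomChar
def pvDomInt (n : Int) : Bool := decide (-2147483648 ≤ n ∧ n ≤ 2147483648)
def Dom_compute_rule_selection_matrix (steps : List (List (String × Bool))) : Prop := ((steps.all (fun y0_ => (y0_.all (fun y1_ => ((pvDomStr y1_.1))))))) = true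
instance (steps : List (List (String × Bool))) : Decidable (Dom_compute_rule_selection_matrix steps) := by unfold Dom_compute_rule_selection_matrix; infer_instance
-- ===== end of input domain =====

-- B differs from A only in decomposition: aggregate totals + inclusion-exclusion instead of per-quadrant branches.

-- ===== PORT A =====
-- step["k"]: first-match lookup in the association list; Pre_ guarantees the key is present
-- (the .getD false default is never reached inside Pre_).
def pvLookup (step : List (String × Bool)) (k : String) : Bool :=
  ((PySem.Dict.mk step).get? k).getD false

def pvStepA (m : PySem.Dict String Int) (step : List (String × Bool)) : PySem.Dict String Int :=
  let rules_ok := pvLookup step "rules_correct"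
  let state_ok := pvLookup step "state_correct"
  if rules_ok && state_ok then m.modify "right_rule_right_state" 0 (· + 1)
  else if rules_ok && !state_ok then m.modify "right_rule_wrong_state" 0 (· + 1)
  else if !rules_ok && state_ok then m.modify "wrong_rule_right_state" 0 (· + 1)
  else m.modify "wrong_rule_wrong_state" 0 (· + 1)

def compute_rule_selection_matrix (steps : List (List (String × Bool))) : List (String × Int) :=
  (steps.foldl pvStepA
    (PySem.Dict.mk [("right_rule_right_state", 0), ("right_rule_wrong_state", 0),
                    ("wrong_rule_right_state", 0), ("wrong_rule_wrong_state", 0)])).items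

-- ===== PORT B =====
def pvStepB (c : Int × Int × Int × Int) (step : List (String × Bool)) : Int × Int × Int × Int :=
  let rules_ok := pvLookup step "rules_correct"
  let state_ok := pvLookup step "state_correct"
  (c.1 + 1,
   c.2.1 + (if rules_ok then 1 else 0),
   c.2.2.1 + (if state_ok then 1 else 0),
   c.2.2.2 + (if rules_ok && state_ok then 1 else 0))

def compute_rule_selection_matrix_alt (steps : List (List (String × Bool))) : List (String × Int) :=
  let c := steps.foldl pvStepB (0, 0, 0, 0)
  [("right_rule_right_state", c.2.2.2),
   ("right_rule_wrong_state", c.2.1 - c.2.2.2),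
   ("wrong_rule_right_state", c.2.2.1 - c.2.2.2),
   ("wrong_rule_wrong_state", c.1 - c.2.1 - c.2.2.1 + c.2.2.2)]

-- ===== PRECONDITION & SPEC =====
-- Pre_: every step dict contains both keys; on a step missing either key the Python A raises KeyError.
def Pre_compute_rule_selection_matrix (steps : List (List (String × Bool))) : Prop :=
  (steps.all (fun step => step.any (fun p => p.1 == "rules_correct")
                        && step.any (fun p => p.1 == "state_correct"))) = true
instance (steps : List (List (String × Bool))) : Decidable (Pre_compute_rule_selection_matrix steps) := by
  unfold Pre_compute_rule_selection_matrix; infer_instance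
def pvWitness_compute_rule_selection_matrix : (List (List (String × Bool))) :=
  [[("rules_correct", true), ("state_correct", false)], [("rules_correct", false), ("state_correct", true)]]

def Spec_compute_rule_selection_matrix (steps : List (List (String × Bool))) (out : List (String × Int)) : Prop := out = compute_rule_selection_matrix_alt steps
instance (steps : List (List (String × Bool))) (out : List (String × Int)) : Decidable (Spec_compute_rule_selection_matrix steps out) := by unfold Spec_compute_rule_selection_matrix; infer_instance

-- ===== CLAIM (what is proved, stated in full; the proofs are below) =====
def Claim_equal_compute_rule_selection_matrix : Prop := ∀ (steps : List (List (String × Bool))), Dom_compute_rule_selection_matrix steps → Pre_compute_rule_selection_matrix steps → Spec_compute_rule_selection_matrix steps (compute_rule_selection_matrix steps)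

-- ===== LEMMAS AND PROOFS =====

-- The invariant tying A's running dict to B's four counters (t, r, s, b).
def pvMk (t r s b : Int) : PySem.Dict String Int :=
  PySem.Dict.mk [("right_rule_right_state", b), ("right_rule_wrong_state", r - b),
                 ("wrong_rule_right_state", s - b), ("wrong_rule_wrong_state", t - r - s + b)]

theorem pv_loop (steps : List (List (String × Bool))) :
    ∀ (t r s b : Int),
      steps.foldl pvStepA (pvMk t r s b)
        = pvMk (steps.foldl pvStepB (t, r, s, b)).1
               (steps.foldl pvStepB (t, r, s, b)).2.1
               (steps.foldl pvStepB (t, r, s, b)).2.2.1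
               (steps.foldl pvStepB (t, r, s, b)).2.2.2 := by
  induction steps with
  | nil => intro t r s b; rfl
  | cons step rest ih =>
    intro t r s b
    have hA : pvStepA (pvMk t r s b) step
        = pvMk (pvStepB (t, r, s, b) step).1 (pvStepB (t, r, s, b) step).2.1
               (pvStepB (t, r, s, b) step).2.2.1 (pvStepB (t, r, s, b) step).2.2.2 := by
      cases hr : pvLookup step "rules_correct" <;>
        cases hs : pvLookup step "state_correct" <;>
          · simp only [pvStepA, pvStepB, hr, hs, Bool.and_self, Bool.and_false,
              Bool.and_true, Bool.not_true, Bool.not_false, Bool.false_eq_true, if_true, if_false,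
              pvMk, PySem.Dict.modify]
            apply PySem.Dict.ext
            simp [PySem.Dict.insert, PySem.Dict.getD, PySem.Dict.get?]
            omega
    simp only [List.foldl_cons, hA, ih]

theorem compute_rule_selection_matrix_spec : Claim_equal_compute_rule_selection_matrix := by
  intro steps _ _
  unfold Spec_compute_rule_selection_matrix compute_rule_selection_matrix compute_rule_selection_matrix_alt
  have h := pv_loop steps 0 0 0 0
  have h0 : pvMk 0 0 0 0
      = PySem.Dict.mk [("right_rule_right_state", 0), ("right_rule_wrong_state", 0),
                       ("wrong_rule_right_state", 0), ("wrong_rule_wrong_state", 0)] := by rfl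
  rw [← h0, h]
  simp [pvMk]
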